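-- pv_equiv track=rewrite | github.com/morison1/chess | main.py | arg_max_with_width
-- ===== SOURCE A (Python) =====
-- from collections import Counter
--
-- def arg_max_with_width(array, width, mod):
--     """
--     array - list of integers
--     width - int
--     return x in array s.t. [x - width <= y <= x + width (mod) for y in array] is maximal
--     """
--     array_counts = Counter(array)
--     max_value = 0
--     max_arg = -1
--     for x in array_counts:
--         x_val = 0
--         for y in range(x - width, x + width + 1):
--             y = y % mod
--             x_val += array_counts[y]
--         if x_val > max_value:
--             max_value = x_val
--             max_arg = x
--     return max_arg
-- ===== SOURCE B (Python) =====
-- from bisect import bisect_left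
--
-- def arg_max_with_width(array, width, mod):
--     """
--     array - list of integers
--     width - int
--     return x in array s.t. [x - width <= y <= x + width (mod) for y in array] is maximal
--     """
--     if width < 0:
--         return -1
--     # Each window is a circular interval of residues in [0, mod): sort the
--     # values that are residues and answer every window with two bisections,
--     # counting full wraps of the window in closed form.
--     vals = sorted(v for v in array if 0 <= v < mod)
--     total = len(vals)
--
--     def count_in(a, b):
--         return bisect_left(vals, b) - bisect_left(vals, a)
--
--     full, r = divmod(2 * width + 1, mod)
--     best, arg = 0, -1
--     for x in dict.fromkeys(array):
--         a = (x - width) % mod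
--         val = full * total
--         if a + r <= mod:
--             val += count_in(a, a + r)
--         else:
--             val += count_in(a, mod) + count_in(0, a + r - mod)
--         if val > best:
--             best, arg = val, x
--     return arg
-- ===== Notes on version B (the rewrite author's own statement) =====
-- stated objective: faster
-- what changed: Replaces the per-candidate scan over the whole 2*width+1 window with sorting the residue values once and answering each candidate's circular window with two bisections (full wraps of the window counted in closed form); Pre_ restricts the modulus to be positive (except when the window is empty): A raises ZeroDivisionError for mod = 0, and a negative modulus is outside the natural domain of the function.
-- outside the precondition, e.g. on arg_max_with_width([-2], 0, -3): A returns -2, B returns -1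
import Mathlib
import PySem

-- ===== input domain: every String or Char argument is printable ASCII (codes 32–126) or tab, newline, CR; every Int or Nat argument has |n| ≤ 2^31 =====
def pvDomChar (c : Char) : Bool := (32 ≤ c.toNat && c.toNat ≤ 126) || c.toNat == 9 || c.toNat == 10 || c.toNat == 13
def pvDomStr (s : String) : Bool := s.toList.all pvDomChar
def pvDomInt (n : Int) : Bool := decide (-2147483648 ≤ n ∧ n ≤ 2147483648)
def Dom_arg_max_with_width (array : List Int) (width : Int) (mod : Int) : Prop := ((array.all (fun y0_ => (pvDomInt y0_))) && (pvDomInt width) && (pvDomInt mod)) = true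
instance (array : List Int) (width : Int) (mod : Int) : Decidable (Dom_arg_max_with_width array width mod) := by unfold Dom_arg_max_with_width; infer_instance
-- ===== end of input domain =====

-- B answers each candidate's circular window with two bisections on the sorted residue
-- values (full wraps in closed form) instead of A's scan over the whole window.

-- ===== PORT A =====
-- A: Counter over the array, then for every distinct value x scan the whole
-- window range(x-width, x+width+1), adding the count of each y % mod.
def arg_max_with_width (array : List Int) (width : Int) (mod : Int) : Int :=
  let array_counts := PySem.Dict.counter array
  let st := array_counts.keys.foldl (fun (st : Int × Int) x =>
    let x_val := (PySem.List.pyRange (x - width) (x + width + 1) 1).foldl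
      (fun x_val y => x_val + array_counts.getD (PySem.Int.mod y mod) 0) (0 : Int)
    if x_val > st.1 then (x_val, x) else st) ((0 : Int), (-1 : Int))
  st.2

-- ===== PORT B =====
-- B: sort the values that are residues in [0, mod); each window query is
-- full * total plus one or two bisection-counted segments.
def pvCountIn (vals : List Int) (a b : Int) : Int :=
  ((PySem.List.bisectLeft vals b : Nat) : Int) - ((PySem.List.bisectLeft vals a : Nat) : Int)

def arg_max_with_width_alt (array : List Int) (width : Int) (mod : Int) : Int :=
  if width < 0 then -1 else
  let vals := PySem.List.sorted (array.filter (fun v => 0 ≤ v && v < mod)) (fun k => k) false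
  let total := (vals.length : Int)
  let full := PySem.Int.floordiv (2 * width + 1) mod
  let r := PySem.Int.mod (2 * width + 1) mod
  let st := (PySem.List.dedup array).foldl (fun (st : Int × Int) x =>
    let a := PySem.Int.mod (x - width) mod
    let val := full * total +
      (if a + r ≤ mod then pvCountIn vals a (a + r)
       else pvCountIn vals a mod + pvCountIn vals 0 (a + r - mod))
    if val > st.1 then (val, x) else st) ((0 : Int), (-1 : Int))
  st.2

-- ===== PRECONDITION & SPEC =====
-- Pre_ restricts the modulus to be positive except when the window is empty (width < 0,
-- where neither program ever takes a remainder): for mod = 0 A raises ZeroDivisionError,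
-- and a negative modulus is outside the natural domain of the function (A still returns
-- there, counting only the values in (mod, 0]).
def Pre_arg_max_with_width (array : List Int) (width : Int) (mod : Int) : Prop :=
  0 < mod ∨ width < 0
instance (array : List Int) (width : Int) (mod : Int) : Decidable (Pre_arg_max_with_width array width mod) := by unfold Pre_arg_max_with_width; infer_instance

def pvWitness_arg_max_with_width : List Int × Int × Int := ([1, 2, 7], 1, 5)

def Spec_arg_max_with_width (array : List Int) (width : Int) (mod : Int) (out : Int) : Prop := out = arg_max_with_width_alt array width mod
instance (array : List Int) (width : Int) (mod : Int) (out : Int) : Decidable (Spec_arg_max_with_width array width mod out) := by unfold Spec_arg_max_with_width; infer_instance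

-- ===== CLAIM (what is proved, stated in full; the proofs are below) =====
def Claim_equal_arg_max_with_width : Prop := ∀ (array : List Int) (width : Int) (mod : Int), Dom_arg_max_with_width array width mod → Pre_arg_max_with_width array width mod → Spec_arg_max_with_width array width mod (arg_max_with_width array width mod)

-- ===== LEMMAS AND PROOFS =====

theorem pvSumIndicator (R : List Int) (v : Int) (h : R.Nodup) :
    (R.map (fun j => if v = j then (1:Int) else 0)).sum = if v ∈ R then (1:Int) else 0 := by
  induction R with
  | nil => simp
  | cons j R ih =>
    simp only [List.nodup_cons] at h
    simp only [List.map_cons, List.sum_cons, ih h.2, List.mem_cons]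
    by_cases hv : v = j
    · subst hv; simp [h.1]
    · simp [hv]

theorem pvSumCount (R l : List Int) (h : R.Nodup) :
    (R.map (fun j => (l.count j : Int))).sum = (l.countP (fun v => decide (v ∈ R)) : Int) := by
  induction l with
  | nil => simp
  | cons x l ih =>
    have hc : ∀ j : Int, ((x :: l).count j : Int) = (l.count j : Int) + (if x = j then (1:Int) else 0) := by
      intro j
      by_cases hx : x = j <;> simp [hx]
    simp only [hc]
    rw [PySem.List.sum_map_add_int, ih, pvSumIndicator R x h, List.countP_cons]
    by_cases hm : x ∈ R <;> simp [hm]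

theorem pvCountPSplit (a b : Int) (hab : a ≤ b) (l : List Int) :
    (l.countP (fun v => decide (v < b)) : Int) =
      l.countP (fun v => decide (v < a)) + l.countP (fun v => decide (a ≤ v) && decide (v < b)) := by
  induction l with
  | nil => simp
  | cons x l ih =>
    simp only [List.countP_cons]
    push_cast
    by_cases h1 : x < a
    · simp [h1, show x < b from by omega, show ¬ (a ≤ x) from by omega]; omega
    · by_cases h2 : x < b
      · simp [h1, h2, show a ≤ x from by omega]; omega
      · simp [h1, h2]; omega

theorem pvBisectTake (keys : List Int) (c : Int) (h : keys.Pairwise (· ≤ ·)) :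
    keys.take (PySem.List.bisectLeft keys c) = keys.filter (fun k => decide (k < c)) := by
  obtain ⟨hle, hlt, hge⟩ := PySem.List.bisectLeft_spec keys c h
  set n := PySem.List.bisectLeft keys c with hn
  conv_rhs => rw [← List.take_append_drop n keys]
  rw [List.filter_append]
  have h1 : (keys.take n).filter (fun k => decide (k < c)) = keys.take n := by
    apply List.filter_eq_self.mpr
    intro x hx
    obtain ⟨i, hi, hix⟩ := List.getElem_of_mem hx
    have hil : i < keys.length := by simp at hi; omega
    have hi' : i < n := by simp at hi; omega
    have hkx : keys[i]'hil = x := by rw [← hix]; simp [List.getElem_take]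
    simp [← hkx, hlt i hil hi']
  have h2 : (keys.drop n).filter (fun k => decide (k < c)) = [] := by
    apply List.filter_eq_nil_iff.mpr
    intro x hx
    obtain ⟨i, hi, hix⟩ := List.getElem_of_mem hx
    have hni : n + i < keys.length := by simp at hi; omega
    rw [List.getElem_drop] at hix
    have := hge (n + i) hni (by omega)
    simp only [decide_eq_true_eq]
    omega
  rw [h1, h2, List.append_nil]

theorem pvBisectCount (vals : List Int) (c : Int) (h : vals.Pairwise (· ≤ ·)) :
    ((PySem.List.bisectLeft vals c : Nat) : Int) = (vals.countP (fun v => decide (v < c)) : Int) := by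
  obtain ⟨hle, -, -⟩ := PySem.List.bisectLeft_spec vals c h
  have ht := congrArg List.length (pvBisectTake vals c h)
  rw [List.length_take, Nat.min_eq_left hle] at ht
  rw [ht, List.countP_eq_length_filter]

theorem pvCountInEq (res : List Int) (a b : Int) (hab : a ≤ b) :
    pvCountIn (PySem.List.sorted res (fun k => k) false) a b =
      (res.countP (fun v => decide (a ≤ v) && decide (v < b)) : Int) := by
  have hp : (PySem.List.sorted res (fun k => k) false).Pairwise (· ≤ ·) := by
    simpa using PySem.List.sorted_pairwise res (fun k => k)
  have hperm : (PySem.List.sorted res (fun k => k) false).Perm res :=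
    PySem.List.sorted_perm res (fun k => k) false
  unfold pvCountIn
  rw [pvBisectCount _ _ hp, pvBisectCount _ _ hp,
    hperm.countP_eq, hperm.countP_eq, pvCountPSplit a b hab res]
  ring

theorem pvEmodShift (s k M : Int) (_hM : 0 < M) : (s + k) % M = (s % M + k) % M := by
  conv_lhs => rw [show s = M * (s / M) + s % M from (Int.mul_ediv_add_emod s M).symm]
  rw [show M * (s / M) + s % M + k = s % M + k + M * (s / M) from by ring,
    Int.add_mul_emod_self_left]

theorem pvWindowMap (M s r : Int) (hM : 0 < M) (h0 : 0 ≤ r) (h1 : r ≤ M) :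
    (PySem.List.pyRange s (s + r) 1).map (fun y => y % M) =
      if s % M + r ≤ M then PySem.List.pyRange (s % M) (s % M + r) 1
      else PySem.List.pyRange (s % M) M 1 ++ PySem.List.pyRange 0 (s % M + r - M) 1 := by
  have ha0 : 0 ≤ s % M := Int.emod_nonneg s (by omega)
  have ha1 : s % M < M := Int.emod_lt_of_pos s hM
  have key : ∀ k : Int, 0 ≤ k → k < r →
      (s + k) % M = if s % M + k < M then s % M + k else s % M + k - M := by
    intro k hk0 hk1
    rw [pvEmodShift s k M hM]
    by_cases hc : s % M + k < M
    · rw [if_pos hc]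
      exact Int.emod_eq_of_lt (by omega) (by omega)
    · rw [if_neg hc]
      have he : (s % M + k) % M = (s % M + k - M) % M := by
        conv_lhs => rw [show s % M + k = (s % M + k - M) + M * 1 from by ring]
        rw [Int.add_mul_emod_self_left]
      rw [he]
      exact Int.emod_eq_of_lt (by omega) (by omega)
  by_cases hc : s % M + r ≤ M
  · rw [if_pos hc]
    apply List.ext_getElem
    · simp only [List.length_map, PySem.List.length_pyRange_one]
      omega
    · intro i hi1 hi2
      simp only [List.getElem_map, PySem.List.getElem_pyRange_one]
      rw [PySem.List.length_pyRange_one] at hi2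
      rw [key i (by omega) (by omega)]
      rw [if_pos (by omega)]
  · rw [if_neg hc]
    apply List.ext_getElem
    · simp only [List.length_map, List.length_append, PySem.List.length_pyRange_one]
      omega
    · intro i hi1 hi2
      simp only [List.getElem_map, PySem.List.getElem_pyRange_one]
      rw [List.length_map, PySem.List.length_pyRange_one] at hi1
      by_cases hi : (i : Int) < M - s % M
      · rw [List.getElem_append_left (by simp [PySem.List.length_pyRange_one]; omega)]
        rw [PySem.List.getElem_pyRange_one, key i (by omega) (by omega), if_pos (by omega)]
      · rw [List.getElem_append_right (by simp [PySem.List.length_pyRange_one]; omega)]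
        rw [PySem.List.getElem_pyRange_one, key i (by omega) (by omega), if_neg (by omega)]
        simp only [PySem.List.length_pyRange_one]
        omega

theorem pvTailSum (h : Int → Int) (M s r : Int) (hM : 0 < M) (h0 : 0 ≤ r) (h1 : r ≤ M) :
    ((PySem.List.pyRange s (s + r) 1).map (fun y => h (y % M))).sum =
      if s % M + r ≤ M then ((PySem.List.pyRange (s % M) (s % M + r) 1).map h).sum
      else ((PySem.List.pyRange (s % M) M 1).map h).sum
        + ((PySem.List.pyRange 0 (s % M + r - M) 1).map h).sum := by
  have hmap : (PySem.List.pyRange s (s + r) 1).map (fun y => h (y % M)) =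
      ((PySem.List.pyRange s (s + r) 1).map (fun y => y % M)).map h := by
    rw [List.map_map]; rfl
  rw [hmap, pvWindowMap M s r hM h0 h1]
  by_cases hc : s % M + r ≤ M
  · rw [if_pos hc, if_pos hc]
  · rw [if_neg hc, if_neg hc, List.map_append, List.sum_append]

theorem pvBlockSum (h : Int → Int) (M s : Int) (hM : 0 < M) :
    ((PySem.List.pyRange s (s + M) 1).map (fun y => h (y % M))).sum =
      ((PySem.List.pyRange 0 M 1).map h).sum := by
  have ha0 : 0 ≤ s % M := Int.emod_nonneg s (by omega)
  have ha1 : s % M < M := Int.emod_lt_of_pos s hM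
  rw [pvTailSum h M s M hM (by omega) (by omega)]
  by_cases hc : s % M + M ≤ M
  · rw [if_pos hc]
    have : s % M = 0 := by omega
    rw [this]; ring_nf
  · rw [if_neg hc]
    have hsplit : PySem.List.pyRange 0 M 1 =
        PySem.List.pyRange 0 (s % M) 1 ++ PySem.List.pyRange (s % M) M 1 :=
      PySem.List.pyRange_one_append 0 (s % M) M (by omega) (by omega)
    rw [hsplit, List.map_append, List.sum_append]
    have : s % M + M - M = s % M := by ring
    rw [this]
    ring

theorem pvBlocks (h : Int → Int) (M : Int) (hM : 0 < M) (q : Nat) :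
    ∀ (s r : Int), 0 ≤ r → r ≤ M →
    ((PySem.List.pyRange s (s + ((q : Int) * M + r)) 1).map (fun y => h (y % M))).sum =
      (q : Int) * ((PySem.List.pyRange 0 M 1).map h).sum
        + ((PySem.List.pyRange s (s + r) 1).map (fun y => h (y % M))).sum := by
  induction q with
  | zero => intro s r h0 h1; simp
  | succ q ih =>
    intro s r h0 h1
    have hsplit : PySem.List.pyRange s (s + (((q:Int) + 1) * M + r)) 1 =
        PySem.List.pyRange s (s + M) 1 ++
          PySem.List.pyRange (s + M) (s + M + ((q:Int) * M + r)) 1 := by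
      rw [show s + (((q:Int) + 1) * M + r) = s + M + ((q:Int) * M + r) from by ring]
      exact PySem.List.pyRange_one_append s (s + M) _ (by omega) (by nlinarith)
    push_cast
    rw [hsplit, List.map_append, List.sum_append, pvBlockSum h M s hM, ih (s + M) r h0 h1]
    have htail : ((PySem.List.pyRange (s + M) (s + M + r) 1).map (fun y => h (y % M))).sum =
        ((PySem.List.pyRange s (s + r) 1).map (fun y => h (y % M))).sum := by
      rw [pvTailSum h M (s + M) r hM h0 h1, pvTailSum h M s r hM h0 h1]
      have : (s + M) % M = s % M := by
        rw [show s + M = s + M * 1 from by ring, Int.add_mul_emod_self_left]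
      rw [this]
    rw [htail]
    ring

theorem pvRangeCount (res : List Int) (lo hi : Int) :
    ((PySem.List.pyRange lo hi 1).map (fun j => (res.count j : Int))).sum =
      (res.countP (fun v => decide (lo ≤ v) && decide (v < hi)) : Int) := by
  rw [pvSumCount _ res (PySem.List.nodup_pyRange_one lo hi)]
  congr 1
  apply List.countP_congr
  intro x hx
  simp [PySem.List.mem_pyRange_one]

theorem pvCountTransfer (array : List Int) (mod : Int) (hM : 0 < mod) (y : Int) :
    ((array.count (PySem.Int.mod y mod) : Nat) : Int) =
      (((array.filter (fun v => 0 ≤ v && v < mod)).count (y % mod) : Nat) : Int) := by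
  rw [PySem.Int.mod_eq_emod_of_pos hM]
  congr 1
  symm
  apply List.count_filter
  simp only [Bool.and_eq_true, decide_eq_true_eq]
  exact ⟨Int.emod_nonneg y (by omega), Int.emod_lt_of_pos y hM⟩

theorem pvPerX (res : List Int) (M w x : Int) (hM : 0 < M) (hw : 0 ≤ w)
    (hres : ∀ v ∈ res, 0 ≤ v ∧ v < M) :
    ((PySem.List.pyRange (x - w) (x + w + 1) 1).map (fun y => (res.count (y % M) : Int))).sum =
      PySem.Int.floordiv (2 * w + 1) M
          * (((PySem.List.sorted res (fun k => k) false).length : Nat) : Int) +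
        (if PySem.Int.mod (x - w) M + PySem.Int.mod (2 * w + 1) M ≤ M then
           pvCountIn (PySem.List.sorted res (fun k => k) false) (PySem.Int.mod (x - w) M)
             (PySem.Int.mod (x - w) M + PySem.Int.mod (2 * w + 1) M)
         else
           pvCountIn (PySem.List.sorted res (fun k => k) false) (PySem.Int.mod (x - w) M) M +
             pvCountIn (PySem.List.sorted res (fun k => k) false) 0
               (PySem.Int.mod (x - w) M + PySem.Int.mod (2 * w + 1) M - M)) := by
  have ha0 : 0 ≤ (x - w) % M := Int.emod_nonneg _ (by omega)
  have ha1 : (x - w) % M < M := Int.emod_lt_of_pos _ hM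
  have hr0 : 0 ≤ (2 * w + 1) % M := Int.emod_nonneg _ (by omega)
  have hr1 : (2 * w + 1) % M < M := Int.emod_lt_of_pos _ hM
  have hlen : (((PySem.List.sorted res (fun k => k) false).length : Nat) : Int) = (res.length : Int) := by
    rw [(PySem.List.sorted_perm res (fun k => k) false).length_eq]
  have hLlen : (res.countP (fun v => decide (0 ≤ v) && decide (v < M)) : Int) = (res.length : Int) := by
    congr 1
    apply List.countP_eq_length.mpr
    intro v hv
    have := hres v hv
    simp only [Bool.and_eq_true, decide_eq_true_eq]
    omega
  rw [PySem.Int.mod_eq_emod_of_pos hM, PySem.Int.mod_eq_emod_of_pos hM,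
    PySem.Int.floordiv_eq_ediv_of_pos hM, hlen]
  have hq0 : 0 ≤ (2 * w + 1) / M := Int.ediv_nonneg (by omega) (le_of_lt hM)
  have hq : ((((2 * w + 1) / M).toNat : Nat) : Int) = (2 * w + 1) / M := Int.toNat_of_nonneg hq0
  have hsplitL : x + w + 1 = (x - w) + ((((2 * w + 1) / M).toNat : Int) * M + (2 * w + 1) % M) := by
    rw [hq, mul_comm]
    have := Int.mul_ediv_add_emod (2 * w + 1) M
    omega
  rw [hsplitL,
    pvBlocks (fun j => (res.count j : Int)) M hM (((2 * w + 1) / M).toNat) (x - w) ((2 * w + 1) % M) hr0 (by omega),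
    pvTailSum (fun j => (res.count j : Int)) M (x - w) ((2 * w + 1) % M) hM hr0 (by omega),
    hq, pvRangeCount res 0 M, hLlen]
  by_cases hc : (x - w) % M + (2 * w + 1) % M ≤ M
  · rw [if_pos hc, if_pos hc, pvRangeCount, pvCountInEq res _ _ (by omega)]
  · rw [if_neg hc, if_neg hc, pvRangeCount, pvRangeCount,
      pvCountInEq res _ _ (by omega), pvCountInEq res _ _ (by omega)]

theorem pvFoldZeroBody (l : List Int) :
    (l.foldl (fun (st : Int × Int) x => if (0:Int) > st.1 then ((0:Int), x) else st)
      ((0:Int), (-1:Int))) = (0, -1) := by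
  induction l with
  | nil => rfl
  | cons a l ih =>
    rw [List.foldl_cons]
    norm_num
    exact ih

-- ===== VERDICT (by name: the statement is the Claim_ definition above) =====

theorem arg_max_with_width_spec : Claim_equal_arg_max_with_width := by
  unfold Claim_equal_arg_max_with_width
  intro array width mod hdom hpre
  unfold Spec_arg_max_with_width
  by_cases hwneg : width < 0
  · unfold arg_max_with_width arg_max_with_width_alt
    rw [if_pos hwneg]
    have hz : ∀ x : Int, (PySem.List.pyRange (x - width) (x + width + 1) 1).foldl
        (fun x_val y => x_val + (PySem.Dict.counter array).getD (PySem.Int.mod y mod) 0) (0:Int) = 0 := by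
      intro x
      rw [PySem.List.pyRange_one_eq_nil (by omega)]
      rfl
    simp only [hz]
    rw [pvFoldZeroBody]
  · have hM : (0:Int) < mod := by
      rcases hpre with h | h
      · exact h
      · omega
    have hw : (0:Int) ≤ width := by omega
    unfold arg_max_with_width arg_max_with_width_alt
    rw [if_neg hwneg]
    simp only [PySem.Dict.keys_counter, PySem.Dict.getD_counter, PySem.List.dedup_eq_ofList]
    have hcore : ∀ x : Int,
        (PySem.List.pyRange (x - width) (x + width + 1) 1).foldl
            (fun x_val y => x_val + ((array.count (PySem.Int.mod y mod) : Nat) : Int)) (0:Int)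
          = PySem.Int.floordiv (2 * width + 1) mod
                * (((PySem.List.sorted (array.filter (fun v => 0 ≤ v && v < mod)) (fun k => k) false).length : Nat) : Int) +
              (if PySem.Int.mod (x - width) mod + PySem.Int.mod (2 * width + 1) mod ≤ mod then
                 pvCountIn (PySem.List.sorted (array.filter (fun v => 0 ≤ v && v < mod)) (fun k => k) false)
                   (PySem.Int.mod (x - width) mod)
                   (PySem.Int.mod (x - width) mod + PySem.Int.mod (2 * width + 1) mod)
               else
                 pvCountIn (PySem.List.sorted (array.filter (fun v => 0 ≤ v && v < mod)) (fun k => k) false)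
                   (PySem.Int.mod (x - width) mod) mod +
                   pvCountIn (PySem.List.sorted (array.filter (fun v => 0 ≤ v && v < mod)) (fun k => k) false) 0
                     (PySem.Int.mod (x - width) mod + PySem.Int.mod (2 * width + 1) mod - mod)) := by
      intro x
      rw [PySem.List.foldl_add]
      simp only [pvCountTransfer array mod hM]
      rw [zero_add]
      exact pvPerX (array.filter (fun v => 0 ≤ v && v < mod)) mod width x hM hw
        (by intro v hv; have := List.mem_filter.mp hv
            simp only [Bool.and_eq_true, decide_eq_true_eq] at this
            exact this.2)
    congr 1
    apply List.foldl_ext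
    intro st x hx
    rw [hcore x]
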